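-- pv_equiv track=rewrite | github.com/Pundima-Lakshan/vimaze | vimaze/old_maze_image_processor_backup_folder/maze_image_processor-chathura.py | _ensure_wall_consistency
-- ===== SOURCE A (Python) =====
-- from typing import TYPE_CHECKING, Tuple, List, Set, Dict, Optional
--
-- def _ensure_wall_consistency(walls: List[List[int]], grid_size: int) -> List[List[int]]:
--     """
--     Ensure consistency of walls between adjacent cells.
--
--     Args:
--         walls: List of wall indicators for each cell
--         grid_size: Grid size
--
--     Returns:
--         Consistent list of wall indicators
--     """
--     # Convert the flat list of walls into a 2D grid for easier adjacency checks
--     grid_walls = []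
--     for i in range(grid_size):
--         row = []
--         for j in range(grid_size):
--             idx = i * grid_size + j
--             row.append(walls[idx])
--         grid_walls.append(row)
--
--     # Fix inconsistencies
--     for i in range(grid_size):
--         for j in range(grid_size):
--             # Check right wall consistency
--             if j < grid_size - 1:
--                 # If cell has right wall, adjacent cell should have left wall
--                 if grid_walls[i][j][1] == 1:
--                     grid_walls[i][j+1][3] = 1
--                 # If adjacent cell has left wall, cell should have right wall
--                 elif grid_walls[i][j+1][3] == 1:
--                     grid_walls[i][j][1] = 1
--
--             # Check bottom wall consistency
--             if i < grid_size - 1: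
--                 # If cell has bottom wall, cell below should have top wall
--                 if grid_walls[i][j][2] == 1:
--                     grid_walls[i+1][j][0] = 1
--                 # If cell below has top wall, cell should have bottom wall
--                 elif grid_walls[i+1][j][0] == 1:
--                     grid_walls[i][j][2] = 1
--
--     # Convert back to flat list
--     consistent_walls = []
--     for i in range(grid_size):
--         for j in range(grid_size):
--             consistent_walls.append(grid_walls[i][j])
--
--     return consistent_walls
-- ===== SOURCE B (Python) =====
-- def _ensure_wall_consistency(walls, grid_size):
--     """Pure per-cell recomputation: each of the four walls of a cell is forced
--     to 1 exactly when it or the facing wall of the neighbouring cell is 1 in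
--     the ORIGINAL input; no intermediate 2D grid and no in-place propagation.
--     Unlike A it does not mutate the inner lists of `walls`."""
--     n = grid_size
--
--     def cell(i, j):
--         w = walls[i * n + j]
--         top = 1 if i > 0 and (w[0] == 1 or walls[(i - 1) * n + j][2] == 1) else w[0]
--         right = 1 if j < n - 1 and (w[1] == 1 or walls[i * n + j + 1][3] == 1) else w[1]
--         bottom = 1 if i < n - 1 and (w[2] == 1 or walls[(i + 1) * n + j][0] == 1) else w[2]
--         left = 1 if j > 0 and (w[3] == 1 or walls[i * n + j - 1][1] == 1) else w[3]
--         return [top, right, bottom, left] + w[4:]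
--
--     return [cell(i, j) for i in range(n) for j in range(n)]
-- ===== Notes on version B (the rewrite author's own statement) =====
-- stated objective: simpler
-- what changed: B replaces A's three phases (build a 2D grid, sequentially propagate wall fixes in place, flatten back) by a single pure comprehension that computes each cell's four walls directly from the original flat list -- a wall is 1 iff it or the facing neighbour's wall is 1 in the input -- exploiting that A's per-edge fixes are independent; B does not mutate its argument (A mutates the inner lists in place).
-- outside the precondition, e.g. on _ensure_wall_consistency([[0, 0, 0]], 1): A returns [[0, 0, 0]], B raises IndexError
import Mathlib
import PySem

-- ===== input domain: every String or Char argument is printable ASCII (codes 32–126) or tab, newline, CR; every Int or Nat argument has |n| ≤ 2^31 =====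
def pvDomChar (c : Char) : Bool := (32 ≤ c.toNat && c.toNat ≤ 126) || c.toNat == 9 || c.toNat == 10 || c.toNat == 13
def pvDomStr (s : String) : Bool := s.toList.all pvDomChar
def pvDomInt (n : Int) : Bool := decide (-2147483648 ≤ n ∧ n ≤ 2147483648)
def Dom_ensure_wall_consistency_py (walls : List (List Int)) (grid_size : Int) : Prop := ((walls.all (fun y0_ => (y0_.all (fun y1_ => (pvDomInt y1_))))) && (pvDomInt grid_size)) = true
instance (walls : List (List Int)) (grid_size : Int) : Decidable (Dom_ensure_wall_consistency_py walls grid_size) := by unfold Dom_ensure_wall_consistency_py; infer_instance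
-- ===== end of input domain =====

-- B recomputes each cell's walls in one pure pass directly from the original flat list (a wall
-- becomes 1 iff it or the facing neighbour wall is 1), instead of A's three phases (build 2D grid,
-- propagate fixes in place, flatten); equivalence is about the RETURN value only: A mutates the
-- inner lists of its argument in place, B does not mutate the argument.

-- B computes each cell's walls in one pure pass directly from the original flat list (a wall is
-- forced to 1 exactly when it or the facing neighbour wall is 1 in the input), instead of A's three
-- phases (build a 2D grid, propagate fixes in place, flatten back).  Equivalence is about the
-- RETURN value only: Python A mutates the inner lists of its argument in place, Python B does not
-- mutate its argument.

-- ===== PORT A =====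
def pvGet3 (g : List (List (List Int))) (i j s : Int) : Int :=
  PySem.List.pyGetD (PySem.List.pyGetD (PySem.List.pyGetD g i []) j []) s 0

def pvSet3 (g : List (List (List Int))) (i j s : Int) (v : Int) : List (List (List Int)) :=
  PySem.List.pySetD g i
    (PySem.List.pySetD (PySem.List.pyGetD g i []) j
      (PySem.List.pySetD (PySem.List.pyGetD (PySem.List.pyGetD g i []) j []) s v))

def ensure_wall_consistency_py (walls : List (List Int)) (grid_size : Int) : List (List Int) :=
  let grid0 : List (List (List Int)) :=
    (PySem.List.pyRange 0 grid_size 1).foldl (fun grid i =>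
      grid ++ [(PySem.List.pyRange 0 grid_size 1).foldl (fun row j =>
        row ++ [PySem.List.pyGetD walls (i * grid_size + j) []]) []]) []
  let grid1 : List (List (List Int)) :=
    (PySem.List.pyRange 0 grid_size 1).foldl (fun g i =>
      (PySem.List.pyRange 0 grid_size 1).foldl (fun g j =>
        let g1 :=
          if j < grid_size - 1 then
            (if pvGet3 g i j 1 = 1 then pvSet3 g i (j+1) 3 1
             else if pvGet3 g i (j+1) 3 = 1 then pvSet3 g i j 1 1
             else g)
          else g
        if i < grid_size - 1 then
          (if pvGet3 g1 i j 2 = 1 then pvSet3 g1 (i+1) j 0 1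
           else if pvGet3 g1 (i+1) j 0 = 1 then pvSet3 g1 i j 2 1
           else g1)
        else g1) g) grid0
  (PySem.List.pyRange 0 grid_size 1).foldl (fun acc i =>
    (PySem.List.pyRange 0 grid_size 1).foldl (fun acc j =>
      acc ++ [PySem.List.pyGetD (PySem.List.pyGetD grid1 i []) j []]) acc) []


-- ===== PORT B =====
def pvRd (walls : List (List Int)) (k s : Int) : Int :=
  PySem.List.pyGetD (PySem.List.pyGetD walls k []) s 0

def pvCell (walls : List (List Int)) (n i j : Int) : List Int :=
  let w := PySem.List.pyGetD walls (i * n + j) []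
  let top := if 0 < i ∧ (PySem.List.pyGetD w 0 0 = 1 ∨ pvRd walls ((i-1) * n + j) 2 = 1) then 1
             else PySem.List.pyGetD w 0 0
  let right := if j < n - 1 ∧ (PySem.List.pyGetD w 1 0 = 1 ∨ pvRd walls (i * n + j + 1) 3 = 1) then 1
               else PySem.List.pyGetD w 1 0
  let bottom := if i < n - 1 ∧ (PySem.List.pyGetD w 2 0 = 1 ∨ pvRd walls ((i+1) * n + j) 0 = 1) then 1
                else PySem.List.pyGetD w 2 0
  let left := if 0 < j ∧ (PySem.List.pyGetD w 3 0 = 1 ∨ pvRd walls (i * n + j - 1) 1 = 1) then 1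
              else PySem.List.pyGetD w 3 0
  [top, right, bottom, left] ++ PySem.List.slice w (some 4) none

def ensure_wall_consistency_py_alt (walls : List (List Int)) (grid_size : Int) : List (List Int) :=
  (PySem.List.pyRange 0 grid_size 1).flatMap (fun i =>
    (PySem.List.pyRange 0 grid_size 1).map (fun j => pvCell walls grid_size i j))


-- ===== PRECONDITION & SPEC =====
-- Pre_ admits a non-positive grid size (both programs return []) or a grid providing the first
-- grid_size^2 cells each with all four wall slots.  It excludes inputs where A raises IndexError
-- (too few cells, or a too-short inner list that A's fixing loop indexes), and the corner where an
-- inner list shorter than 4 is never indexed by A (e.g. grid_size = 1): there A returns the cells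
-- unchanged while B, which always reads all four wall slots of every cell, raises IndexError.
def Pre_ensure_wall_consistency_py (walls : List (List Int)) (grid_size : Int) : Prop :=
  grid_size ≤ 0 ∨
    (grid_size * grid_size ≤ (walls.length : Int) ∧
      ∀ l ∈ walls.take (grid_size * grid_size).toNat, 4 ≤ l.length)

instance (walls : List (List Int)) (grid_size : Int) : Decidable (Pre_ensure_wall_consistency_py walls grid_size) := by
  unfold Pre_ensure_wall_consistency_py; infer_instance

def pvWitness_ensure_wall_consistency_py : List (List Int) × Int :=
  ([[1, 1, 1, 1], [1, 0, 0, 1], [0, 1, 1, 0], [0, 0, 0, 0]], 2)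

def Spec_ensure_wall_consistency_py (walls : List (List Int)) (grid_size : Int) (out : List (List Int)) : Prop := out = ensure_wall_consistency_py_alt walls grid_size
instance (walls : List (List Int)) (grid_size : Int) (out : List (List Int)) : Decidable (Spec_ensure_wall_consistency_py walls grid_size out) := by unfold Spec_ensure_wall_consistency_py; infer_instance

-- ===== CLAIM (what is proved, stated in full; the proofs are below) =====
def Claim_equal_ensure_wall_consistency_py : Prop := ∀ (walls : List (List Int)) (grid_size : Int), Dom_ensure_wall_consistency_py walls grid_size → Pre_ensure_wall_consistency_py walls grid_size → Spec_ensure_wall_consistency_py walls grid_size (ensure_wall_consistency_py walls grid_size)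

-- ===== LEMMAS AND PROOFS =====
def pvOrig (w : List (List Int)) (N i j : Nat) : List Int := w.getD (i * N + j) []

def pvFix (w : List (List Int)) (N i j s : Nat) : Int :=
  let o : Nat → Nat → Nat → Int := fun i j s => (pvOrig w N i j).getD s 0
  match s with
  | 0 => if 0 < i ∧ (o i j 0 = 1 ∨ o (i-1) j 2 = 1) then 1 else o i j 0
  | 1 => if j < N - 1 ∧ (o i j 1 = 1 ∨ o i (j+1) 3 = 1) then 1 else o i j 1
  | 2 => if i < N - 1 ∧ (o i j 2 = 1 ∨ o (i+1) j 0 = 1) then 1 else o i j 2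
  | 3 => if 0 < j ∧ (o i j 3 = 1 ∨ o i (j-1) 1 = 1) then 1 else o i j 3
  | _ => o i j s

def pvGetC (g : List (List (List Int))) (i j : Nat) : List Int := (g.getD i []).getD j []
def pvGetN (g : List (List (List Int))) (i j s : Nat) : Int := (pvGetC g i j).getD s 0
def pvSetN (g : List (List (List Int))) (i j s : Nat) (v : Int) : List (List (List Int)) :=
  g.set i ((g.getD i []).set j ((pvGetC g i j).set s v))

def pvStep (N : Nat) (g : List (List (List Int))) (p : Nat × Nat) : List (List (List Int)) :=
  let i := p.1; let j := p.2
  let g1 :=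
    if j < N - 1 then
      (if pvGetN g i j 1 = 1 then pvSetN g i (j+1) 3 1
       else if pvGetN g i (j+1) 3 = 1 then pvSetN g i j 1 1
       else g)
    else g
  if i < N - 1 then
    (if pvGetN g1 i j 2 = 1 then pvSetN g1 (i+1) j 0 1
     else if pvGetN g1 (i+1) j 0 = 1 then pvSetN g1 i j 2 1
     else g1)
  else g1

def pvOwnB (N pi pj i j s : Nat) : Bool :=
  (s == 1 && i == pi && j == pj && decide (pj < N - 1)) ||
  (s == 3 && i == pi && j == pj + 1 && decide (pj < N - 1)) ||
  (s == 2 && i == pi && j == pj && decide (pi < N - 1)) ||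
  (s == 0 && i == pi + 1 && j == pj && decide (pi < N - 1))

theorem pv_getD_set {α : Type} (xs : List α) (n : Nat) (v : α) (i : Nat) (d : α) :
    (xs.set n v).getD i d = if i = n ∧ n < xs.length then v else xs.getD i d := by
  rw [List.getD, List.getD, List.getElem?_set]
  split_ifs <;> simp_all

theorem pvGetN_setN (g : List (List (List Int))) (a b c : Nat) (v : Int)
    (ha : a < g.length) (hb : b < (g.getD a []).length) (hc : c < (pvGetC g a b).length)
    (i j s : Nat) :
    pvGetN (pvSetN g a b c v) i j s = if i = a ∧ j = b ∧ s = c then v else pvGetN g i j s := by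
  unfold pvGetN pvSetN pvGetC
  rw [pv_getD_set]
  by_cases hia : i = a
  · subst hia
    rw [if_pos ⟨rfl, ha⟩, pv_getD_set]
    by_cases hjb : j = b
    · subst hjb
      rw [if_pos ⟨rfl, hb⟩, pv_getD_set]
      unfold pvGetC at hc
      split_ifs with h1 h2 h2 <;> simp_all
    · rw [if_neg (by tauto)]
      split_ifs with h2 <;> simp_all
  · rw [if_neg (by tauto)]
    split_ifs with h2 <;> simp_all

theorem pvSetN_shape (g : List (List (List Int))) (a b c : Nat) (v : Int) :
    (pvSetN g a b c v).length = g.length ∧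
    (∀ i, ((pvSetN g a b c v).getD i []).length = (g.getD i []).length) ∧
    (∀ i j, (pvGetC (pvSetN g a b c v) i j).length = (pvGetC g i j).length) := by
  refine ⟨by simp [pvSetN], fun i => ?_, fun i j => ?_⟩
  · rw [pvSetN, pv_getD_set]
    split_ifs with h
    · obtain ⟨h1, h2⟩ := h; subst h1; simp
    · rfl
  · rw [pvGetC, pvGetC, pvSetN, pv_getD_set]
    split_ifs with h
    · obtain ⟨h1, h2⟩ := h; subst h1
      rw [pv_getD_set]
      split_ifs with h3
      · obtain ⟨h4, h5⟩ := h3; subst h4; simp [pvGetC]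
      · rfl
    · rfl

theorem pvIdx_lt (N i j : Nat) (hi : i < N) (hj : j < N) : i * N + j < N * N := by
  calc i * N + j < i * N + N := by omega
  _ = (i + 1) * N := by ring
  _ ≤ N * N := Nat.mul_le_mul_right N hi

theorem pvEdge_char (g : List (List (List Int))) (a1 b1 c1 a2 b2 c2 : Nat) (v1 v2 : Int)
    (h1 : pvGetN g a1 b1 c1 = v1) (h2 : pvGetN g a2 b2 c2 = v2)
    (hA1 : a1 < g.length) (hB1 : b1 < (g.getD a1 []).length) (hC1 : c1 < (pvGetC g a1 b1).length)
    (hA2 : a2 < g.length) (hB2 : b2 < (g.getD a2 []).length) (hC2 : c2 < (pvGetC g a2 b2).length) :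
    ((if pvGetN g a1 b1 c1 = 1 then pvSetN g a2 b2 c2 1
      else if pvGetN g a2 b2 c2 = 1 then pvSetN g a1 b1 c1 1 else g).length = g.length ∧
     (∀ i, ((if pvGetN g a1 b1 c1 = 1 then pvSetN g a2 b2 c2 1
      else if pvGetN g a2 b2 c2 = 1 then pvSetN g a1 b1 c1 1 else g).getD i []).length = (g.getD i []).length) ∧
     (∀ i j, (pvGetC (if pvGetN g a1 b1 c1 = 1 then pvSetN g a2 b2 c2 1
      else if pvGetN g a2 b2 c2 = 1 then pvSetN g a1 b1 c1 1 else g) i j).length = (pvGetC g i j).length)) ∧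
    (∀ i j s, pvGetN (if pvGetN g a1 b1 c1 = 1 then pvSetN g a2 b2 c2 1
      else if pvGetN g a2 b2 c2 = 1 then pvSetN g a1 b1 c1 1 else g) i j s =
      if (v1 = 1 ∨ v2 = 1) ∧ ((i = a1 ∧ j = b1 ∧ s = c1) ∨ (i = a2 ∧ j = b2 ∧ s = c2)) then 1
      else pvGetN g i j s) := by
  subst h1 h2
  split_ifs with hv1 hv2
  · refine ⟨⟨(pvSetN_shape g a2 b2 c2 1).1, (pvSetN_shape g a2 b2 c2 1).2.1,
      (pvSetN_shape g a2 b2 c2 1).2.2⟩, fun i j s => ?_⟩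
    rw [pvGetN_setN g a2 b2 c2 1 hA2 hB2 hC2]
    by_cases hB : i = a2 ∧ j = b2 ∧ s = c2
    · rw [if_pos hB, if_pos ⟨Or.inl hv1, Or.inr hB⟩]
    · rw [if_neg hB]
      by_cases hA : i = a1 ∧ j = b1 ∧ s = c1
      · obtain ⟨rfl, rfl, rfl⟩ := hA
        rw [if_pos ⟨Or.inl hv1, Or.inl ⟨rfl, rfl, rfl⟩⟩, hv1]
      · rw [if_neg (by rintro ⟨_, h | h⟩; exacts [hA h, hB h])]
  · refine ⟨⟨(pvSetN_shape g a1 b1 c1 1).1, (pvSetN_shape g a1 b1 c1 1).2.1,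
      (pvSetN_shape g a1 b1 c1 1).2.2⟩, fun i j s => ?_⟩
    rw [pvGetN_setN g a1 b1 c1 1 hA1 hB1 hC1]
    by_cases hA : i = a1 ∧ j = b1 ∧ s = c1
    · rw [if_pos hA, if_pos ⟨Or.inr hv2, Or.inl hA⟩]
    · rw [if_neg hA]
      by_cases hB : i = a2 ∧ j = b2 ∧ s = c2
      · obtain ⟨rfl, rfl, rfl⟩ := hB
        rw [if_pos ⟨Or.inr hv2, Or.inr ⟨rfl, rfl, rfl⟩⟩, hv2]
      · rw [if_neg (by rintro ⟨_, h | h⟩; exacts [hA h, hB h])]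
  · refine ⟨⟨rfl, fun _ => rfl, fun _ _ => rfl⟩, fun i j s => ?_⟩
    rw [if_neg (by rintro ⟨hv | hv, _⟩ <;> [exact hv1 hv; exact hv2 hv])]

theorem pvAssemble (w : List (List Int)) (N pi pj : Nat) (g : List (List (List Int)))
    (hpi : pi < N) (hpj : pj < N)
    (hread1 : pj < N - 1 → pvGetN g pi pj 1 = (pvOrig w N pi pj).getD 1 0)
    (hread2 : pj < N - 1 → pvGetN g pi (pj+1) 3 = (pvOrig w N pi (pj+1)).getD 3 0)
    (hread3 : pi < N - 1 → pvGetN g pi pj 2 = (pvOrig w N pi pj).getD 2 0)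
    (hread4 : pi < N - 1 → pvGetN g (pi+1) pj 0 = (pvOrig w N (pi+1) pj).getD 0 0)
    (i j s : Nat) :
    (if (pi < N - 1) ∧ (((pvOrig w N pi pj).getD 2 0 = 1 ∨ (pvOrig w N (pi+1) pj).getD 0 0 = 1) ∧
        ((i = pi ∧ j = pj ∧ s = 2) ∨ (i = pi + 1 ∧ j = pj ∧ s = 0)))
     then (1:Int) else
     if (pj < N - 1) ∧ (((pvOrig w N pi pj).getD 1 0 = 1 ∨ (pvOrig w N pi (pj+1)).getD 3 0 = 1) ∧
        ((i = pi ∧ j = pj ∧ s = 1) ∨ (i = pi ∧ j = pj + 1 ∧ s = 3)))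
     then (1:Int) else pvGetN g i j s)
    = if pvOwnB N pi pj i j s then pvFix w N i j s else pvGetN g i j s := by
  by_cases hOwn : pvOwnB N pi pj i j s = true
  · rw [if_pos hOwn]
    simp only [pvOwnB, Bool.or_eq_true, Bool.and_eq_true, beq_iff_eq, decide_eq_true_eq] at hOwn
    rcases hOwn with ((⟨⟨⟨hs, hi⟩, hj⟩, hb⟩ | ⟨⟨⟨hs, hi⟩, hj⟩, hb⟩) | ⟨⟨⟨hs, hi⟩, hj⟩, hb⟩) | ⟨⟨⟨hs, hi⟩, hj⟩, hb⟩
    · -- slot (pi, pj, 1)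
      rw [hs, hi, hj]
      rw [if_neg (by rintro ⟨_, _, ⟨_, _, h⟩ | ⟨h, _, _⟩⟩ <;> omega)]
      by_cases hv : (pvOrig w N pi pj).getD 1 0 = 1 ∨ (pvOrig w N pi (pj+1)).getD 3 0 = 1
      · rw [if_pos ⟨hb, hv, Or.inl ⟨rfl, rfl, rfl⟩⟩]
        simp only [pvFix]
        rw [if_pos ⟨hb, hv⟩]
      · rw [if_neg (by rintro ⟨_, hv', _⟩; exact hv hv'), hread1 hb]
        simp only [pvFix]
        rw [if_neg (by rintro ⟨_, hv'⟩; exact hv hv')]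
    · -- slot (pi, pj+1, 3)
      rw [hs, hi, hj]
      rw [if_neg (by rintro ⟨_, _, ⟨_, h, _⟩ | ⟨h, _, _⟩⟩ <;> omega)]
      by_cases hv : (pvOrig w N pi pj).getD 1 0 = 1 ∨ (pvOrig w N pi (pj+1)).getD 3 0 = 1
      · rw [if_pos ⟨hb, hv, Or.inr ⟨rfl, rfl, rfl⟩⟩]
        simp only [pvFix, Nat.add_sub_cancel]
        rw [if_pos ⟨by omega, by tauto⟩]
      · rw [if_neg (by rintro ⟨_, hv', _⟩; exact hv hv'), hread2 hb]
        simp only [pvFix, Nat.add_sub_cancel]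
        rw [if_neg (by rintro ⟨_, hv'⟩; exact hv (by tauto))]
    · -- slot (pi, pj, 2)
      rw [hs, hi, hj]
      by_cases hv : (pvOrig w N pi pj).getD 2 0 = 1 ∨ (pvOrig w N (pi+1) pj).getD 0 0 = 1
      · rw [if_pos ⟨hb, hv, Or.inl ⟨rfl, rfl, rfl⟩⟩]
        simp only [pvFix]
        rw [if_pos ⟨hb, hv⟩]
      · rw [if_neg (by rintro ⟨_, hv', _⟩; exact hv hv'),
          if_neg (by rintro ⟨_, _, ⟨_, _, h⟩ | ⟨_, h, _⟩⟩ <;> omega), hread3 hb]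
        simp only [pvFix]
        rw [if_neg (by rintro ⟨_, hv'⟩; exact hv hv')]
    · -- slot (pi+1, pj, 0)
      rw [hs, hi, hj]
      by_cases hv : (pvOrig w N pi pj).getD 2 0 = 1 ∨ (pvOrig w N (pi+1) pj).getD 0 0 = 1
      · rw [if_pos ⟨hb, hv, Or.inr ⟨rfl, rfl, rfl⟩⟩]
        simp only [pvFix, Nat.add_sub_cancel]
        rw [if_pos ⟨by omega, by tauto⟩]
      · rw [if_neg (by rintro ⟨_, hv', _⟩; exact hv hv'),
          if_neg (by rintro ⟨_, _, ⟨h, _, _⟩ | ⟨_, _, h⟩⟩ <;> omega), hread4 hb]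
        simp only [pvFix, Nat.add_sub_cancel]
        rw [if_neg (by rintro ⟨_, hv'⟩; exact hv (by tauto))]
  · rw [if_neg hOwn]
    rw [if_neg (fun h => by
      obtain ⟨hV', _, ⟨rfl, rfl, rfl⟩ | ⟨rfl, rfl, rfl⟩⟩ := h <;> exact hOwn (by simp [pvOwnB, hV']))]
    rw [if_neg (fun h => by
      obtain ⟨hH', _, ⟨rfl, rfl, rfl⟩ | ⟨rfl, rfl, rfl⟩⟩ := h <;> exact hOwn (by simp [pvOwnB, hH']))]

set_option maxHeartbeats 2000000 in
theorem pvStep_char (w : List (List Int)) (N : Nat) (g : List (List (List Int))) (pi pj : Nat)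
    (hpi : pi < N) (hpj : pj < N)
    (hlen : g.length = N) (hrow : ∀ i, i < N → (g.getD i []).length = N)
    (hcell : ∀ i j, i < N → j < N → (pvGetC g i j).length = (pvOrig w N i j).length)
    (h4 : ∀ k, k < N * N → 4 ≤ (w.getD k []).length)
    (hread1 : pj < N - 1 → pvGetN g pi pj 1 = (pvOrig w N pi pj).getD 1 0)
    (hread2 : pj < N - 1 → pvGetN g pi (pj+1) 3 = (pvOrig w N pi (pj+1)).getD 3 0)
    (hread3 : pi < N - 1 → pvGetN g pi pj 2 = (pvOrig w N pi pj).getD 2 0)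
    (hread4 : pi < N - 1 → pvGetN g (pi+1) pj 0 = (pvOrig w N (pi+1) pj).getD 0 0) :
    ((pvStep N g (pi, pj)).length = g.length ∧
     (∀ i, ((pvStep N g (pi, pj)).getD i []).length = (g.getD i []).length) ∧
     (∀ i j, (pvGetC (pvStep N g (pi, pj)) i j).length = (pvGetC g i j).length)) ∧
    (∀ i j s, pvGetN (pvStep N g (pi, pj)) i j s =
        if pvOwnB N pi pj i j s then pvFix w N i j s else pvGetN g i j s) := by
  have hN1 : pi < g.length := by omega
  have hrowpi : (g.getD pi []).length = N := hrow pi hpi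
  unfold pvStep
  dsimp only
  by_cases hH : pj < N - 1 <;> by_cases hV : pi < N - 1
  · -- both edges
    rw [if_pos hH, if_pos hV]
    set E1 := (if pvGetN g pi pj 1 = 1 then pvSetN g pi (pj+1) 3 1
      else if pvGetN g pi (pj+1) 3 = 1 then pvSetN g pi pj 1 1 else g) with hE1def
    have hpj1 : pj + 1 < N := by omega
    have hpi1 : pi + 1 < N := by omega
    have hc11 : 1 < (pvGetC g pi pj).length := by
      rw [hcell pi pj hpi hpj]; have := h4 _ (pvIdx_lt N pi pj hpi hpj); unfold pvOrig; omega
    have hc13 : 3 < (pvGetC g pi (pj+1)).length := by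
      rw [hcell pi (pj+1) hpi hpj1]; have := h4 _ (pvIdx_lt N pi (pj+1) hpi hpj1); unfold pvOrig; omega
    obtain ⟨sh1, char1⟩ := pvEdge_char g pi pj 1 pi (pj+1) 3 _ _ (hread1 hH) (hread2 hH)
      hN1 (by omega) hc11 hN1 (by omega) hc13
    have hr3 : pvGetN E1 pi pj 2 = (pvOrig w N pi pj).getD 2 0 := by
      rw [char1, if_neg (by rintro ⟨_, ⟨_, _, h⟩ | ⟨_, _, h⟩⟩ <;> omega)]
      exact hread3 hV
    have hr4 : pvGetN E1 (pi+1) pj 0 = (pvOrig w N (pi+1) pj).getD 0 0 := by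
      rw [char1, if_neg (by rintro ⟨_, ⟨_, _, h⟩ | ⟨_, _, h⟩⟩ <;> omega)]
      exact hread4 hV
    have hc22 : 2 < (pvGetC E1 pi pj).length := by
      rw [sh1.2.2, hcell pi pj hpi hpj]; have := h4 _ (pvIdx_lt N pi pj hpi hpj); unfold pvOrig; omega
    have hc20 : 0 < (pvGetC E1 (pi+1) pj).length := by
      rw [sh1.2.2, hcell (pi+1) pj hpi1 hpj]; have := h4 _ (pvIdx_lt N (pi+1) pj hpi1 hpj); unfold pvOrig; omega
    obtain ⟨sh2, char2⟩ := pvEdge_char E1 pi pj 2 (pi+1) pj 0 _ _ hr3 hr4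
      (by rw [sh1.1]; omega) (by rw [sh1.2.1, hrowpi]; omega) hc22
      (by rw [sh1.1]; omega) (by rw [sh1.2.1, hrow (pi+1) hpi1]; omega) hc20
    refine ⟨⟨by rw [sh2.1, sh1.1], fun i => by rw [sh2.2.1, sh1.2.1], fun i j => by rw [sh2.2.2, sh1.2.2]⟩, fun i j s => ?_⟩
    rw [char2, char1]
    clear_value E1
    clear char2 char1 sh2 sh1 hr3 hr4 hc22 hc20 hc11 hc13 hE1def E1 hcell hrow hlen h4 hN1 hrowpi
    refine Eq.trans ?_ (pvAssemble w N pi pj g hpi hpj hread1 hread2 hread3 hread4 i j s)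
    exact if_congr (and_iff_right hV).symm rfl (if_congr (and_iff_right hH).symm rfl rfl)
  · -- horizontal edge only
    rw [if_pos hH, if_neg hV]
    have hpj1 : pj + 1 < N := by omega
    have hc11 : 1 < (pvGetC g pi pj).length := by
      rw [hcell pi pj hpi hpj]; have := h4 _ (pvIdx_lt N pi pj hpi hpj); unfold pvOrig; omega
    have hc13 : 3 < (pvGetC g pi (pj+1)).length := by
      rw [hcell pi (pj+1) hpi hpj1]; have := h4 _ (pvIdx_lt N pi (pj+1) hpi hpj1); unfold pvOrig; omega
    obtain ⟨sh1, char1⟩ := pvEdge_char g pi pj 1 pi (pj+1) 3 _ _ (hread1 hH) (hread2 hH)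
      hN1 (by omega) hc11 hN1 (by omega) hc13
    refine ⟨sh1, fun i j s => ?_⟩
    rw [char1]
    clear char1 sh1 hcell hrow hlen h4 hN1 hrowpi
    refine Eq.trans ?_ (pvAssemble w N pi pj g hpi hpj hread1 hread2 hread3 hread4 i j s)
    conv_rhs => rw [if_neg (fun h => hV h.1)]
    exact if_congr (and_iff_right hH).symm rfl rfl
  · -- vertical edge only
    rw [if_neg hH, if_pos hV]
    have hpi1 : pi + 1 < N := by omega
    have hc22 : 2 < (pvGetC g pi pj).length := by
      rw [hcell pi pj hpi hpj]; have := h4 _ (pvIdx_lt N pi pj hpi hpj); unfold pvOrig; omega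
    have hc20 : 0 < (pvGetC g (pi+1) pj).length := by
      rw [hcell (pi+1) pj hpi1 hpj]; have := h4 _ (pvIdx_lt N (pi+1) pj hpi1 hpj); unfold pvOrig; omega
    obtain ⟨sh1, char1⟩ := pvEdge_char g pi pj 2 (pi+1) pj 0 _ _ (hread3 hV) (hread4 hV)
      hN1 (by omega) hc22 (by omega) (by rw [hrow (pi+1) hpi1]; omega) hc20
    refine ⟨sh1, fun i j s => ?_⟩
    rw [char1]
    clear char1 sh1 hcell hrow hlen h4 hN1 hrowpi
    refine Eq.trans ?_ (pvAssemble w N pi pj g hpi hpj hread1 hread2 hread3 hread4 i j s)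
    exact if_congr (and_iff_right hV).symm rfl (if_neg (fun h => hH h.1)).symm
  · -- no edges
    rw [if_neg hH, if_neg hV]
    refine ⟨⟨rfl, fun _ => rfl, fun _ _ => rfl⟩, fun i j s => ?_⟩
    refine Eq.trans ?_ (pvAssemble w N pi pj g hpi hpj hread1 hread2 hread3 hread4 i j s)
    exact ((if_neg (fun h => hV h.1)).trans (if_neg (fun h => hH h.1))).symm


def pvG0 (w : List (List Int)) (N : Nat) : List (List (List Int)) :=
  (List.range N).map (fun i => (List.range N).map (fun j => pvOrig w N i j))

def pvDoneB (N : Nat) (ps : List (Nat × Nat)) (i j s : Nat) : Bool :=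
  (s == 1 && decide (j < N - 1) && decide ((i, j) ∈ ps)) ||
  (s == 3 && decide (0 < j) && decide ((i, j - 1) ∈ ps)) ||
  (s == 2 && decide (i < N - 1) && decide ((i, j) ∈ ps)) ||
  (s == 0 && decide (0 < i) && decide ((i - 1, j) ∈ ps))

theorem pvOwn_imp_done (N : Nat) (qs : List (Nat × Nat)) (p1 p2 i j s : Nat)
    (h : pvOwnB N p1 p2 i j s = true) : pvDoneB N (qs ++ [(p1, p2)]) i j s = true := by
  simp only [pvOwnB, Bool.or_eq_true, Bool.and_eq_true, beq_iff_eq, decide_eq_true_eq,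
    and_assoc, or_assoc] at h
  simp only [pvDoneB, Bool.or_eq_true, Bool.and_eq_true, beq_iff_eq, decide_eq_true_eq,
    List.mem_append, List.mem_singleton, Prod.mk.injEq, and_assoc, or_assoc]
  rcases h with ⟨hs, hi, hj, hb⟩ | ⟨hs, hi, hj, hb⟩ | ⟨hs, hi, hj, hb⟩ | ⟨hs, hi, hj, hb⟩
  · exact Or.inl ⟨hs, by omega, Or.inr ⟨hi, hj⟩⟩
  · exact Or.inr (Or.inl ⟨hs, by omega, Or.inr ⟨hi, by omega⟩⟩)
  · exact Or.inr (Or.inr (Or.inl ⟨hs, by omega, Or.inr ⟨hi, hj⟩⟩))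
  · exact Or.inr (Or.inr (Or.inr ⟨hs, by omega, Or.inr ⟨by omega, hj⟩⟩))

theorem pvDone_mono (N : Nat) (qs : List (Nat × Nat)) (p : Nat × Nat) (i j s : Nat)
    (h : pvDoneB N qs i j s = true) : pvDoneB N (qs ++ [p]) i j s = true := by
  simp only [pvDoneB, Bool.or_eq_true, Bool.and_eq_true, beq_iff_eq, decide_eq_true_eq,
    List.mem_append] at h ⊢
  tauto

theorem pvDone_append_rev (N : Nat) (qs : List (Nat × Nat)) (p1 p2 i j s : Nat)
    (hi : i < N) (hj : j < N)
    (h : pvDoneB N (qs ++ [(p1, p2)]) i j s = true) :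
    pvOwnB N p1 p2 i j s = true ∨ pvDoneB N qs i j s = true := by
  simp only [pvDoneB, Bool.or_eq_true, Bool.and_eq_true, beq_iff_eq, decide_eq_true_eq,
    List.mem_append, List.mem_singleton, Prod.mk.injEq, and_assoc, or_assoc] at h ⊢
  simp only [pvOwnB, Bool.or_eq_true, Bool.and_eq_true, beq_iff_eq, decide_eq_true_eq,
    and_assoc, or_assoc]
  rcases h with ⟨hs, hb, hm | ⟨hm1, hm2⟩⟩ | ⟨hs, hb, hm | ⟨hm1, hm2⟩⟩ | ⟨hs, hb, hm | ⟨hm1, hm2⟩⟩ | ⟨hs, hb, hm | ⟨hm1, hm2⟩⟩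
  · exact Or.inr (Or.inr (Or.inr (Or.inr (Or.inl ⟨hs, hb, hm⟩))))
  · exact Or.inl ⟨hs, hm1, hm2, by omega⟩
  · exact Or.inr (Or.inr (Or.inr (Or.inr (Or.inr (Or.inl ⟨hs, hb, hm⟩)))))
  · exact Or.inr (Or.inl ⟨hs, hm1, by omega, by omega⟩)
  · exact Or.inr (Or.inr (Or.inr (Or.inr (Or.inr (Or.inr (Or.inl ⟨hs, hb, hm⟩))))))
  · exact Or.inr (Or.inr (Or.inl ⟨hs, hm1, hm2, by omega⟩))
  · exact Or.inr (Or.inr (Or.inr (Or.inr (Or.inr (Or.inr (Or.inr ⟨hs, hb, hm⟩))))))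
  · exact Or.inr (Or.inr (Or.inr (Or.inl ⟨hs, by omega, hm2, by omega⟩)))

theorem pvG0_cell (w : List (List Int)) (N i j : Nat) (hi : i < N) (hj : j < N) :
    pvGetC (pvG0 w N) i j = pvOrig w N i j := by
  simp [pvGetC, pvG0, List.getD, List.getElem?_map, List.getElem?_range, hi, hj]

set_option maxHeartbeats 1000000 in
theorem pv_loop_char (w : List (List Int)) (N : Nat)
    (h4 : ∀ k, k < N * N → 4 ≤ (w.getD k []).length)
    (ps : List (Nat × Nat)) (hval : ∀ p ∈ ps, p.1 < N ∧ p.2 < N) (hnd : ps.Nodup) :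
    (ps.foldl (pvStep N) (pvG0 w N)).length = N ∧
    (∀ i, i < N → ((ps.foldl (pvStep N) (pvG0 w N)).getD i []).length = N) ∧
    (∀ i j, i < N → j < N →
      (pvGetC (ps.foldl (pvStep N) (pvG0 w N)) i j).length = (pvOrig w N i j).length) ∧
    (∀ i j s, i < N → j < N →
      pvGetN (ps.foldl (pvStep N) (pvG0 w N)) i j s =
        if pvDoneB N ps i j s then pvFix w N i j s else (pvOrig w N i j).getD s 0) := by
  induction ps using List.reverseRecOn with
  | nil =>
    refine ⟨by simp [pvG0], fun i hi => ?_, fun i j hi hj => ?_, fun i j s hi hj => ?_⟩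
    · simp [pvG0, List.getD, List.getElem?_map, List.getElem?_range, hi]
    · rw [List.foldl_nil, pvG0_cell w N i j hi hj]
    · rw [List.foldl_nil, pvGetN, pvG0_cell w N i j hi hj, if_neg (by simp [pvDoneB])]
  | append_singleton qs p ih =>
    obtain ⟨p1, p2⟩ := p
    have hnd' := List.Nodup.of_append_left hnd
    have hp : (p1, p2) ∉ qs := by
      intro hmem
      have h' := hnd
      simp [List.nodup_append] at h'
      exact h'.2 _ _ hmem rfl rfl
    have hval' : ∀ q ∈ qs, q.1 < N ∧ q.2 < N := fun q hq => hval q (List.mem_append_left _ hq)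
    obtain ⟨ihlen, ihrow, ihcell, ihchar⟩ := ih hval' hnd'
    have hp1 : p1 < N := (hval (p1, p2) (by simp)).1
    have hp2 : p2 < N := (hval (p1, p2) (by simp)).2
    rw [List.foldl_append, List.foldl_cons, List.foldl_nil]
    obtain ⟨⟨sl, sr, sc⟩, schar⟩ := pvStep_char w N (qs.foldl (pvStep N) (pvG0 w N)) p1 p2 hp1 hp2
      ihlen ihrow ihcell h4
      (fun hb => by
        rw [ihchar p1 p2 1 hp1 hp2, if_neg (by simp [pvDoneB, hp])])
      (fun hb => by
        rw [ihchar p1 (p2+1) 3 hp1 (by omega), if_neg (by simp [pvDoneB, hp])])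
      (fun hb => by
        rw [ihchar p1 p2 2 hp1 hp2, if_neg (by simp [pvDoneB, hp])])
      (fun hb => by
        rw [ihchar (p1+1) p2 0 (by omega) hp2, if_neg (by simp [pvDoneB, hp])])
    refine ⟨sl.trans ihlen, fun i hi => (sr i).trans (ihrow i hi),
      fun i j hi hj => (sc i j).trans (ihcell i j hi hj), fun i j s hi hj => ?_⟩
    rw [schar i j s, ihchar i j s hi hj]
    by_cases hown : pvOwnB N p1 p2 i j s = true
    · rw [if_pos hown, if_pos (pvOwn_imp_done N qs p1 p2 i j s hown)]
    · rw [if_neg hown]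
      by_cases hdq : pvDoneB N qs i j s = true
      · rw [if_pos hdq, if_pos (pvDone_mono N qs (p1, p2) i j s hdq)]
      · rw [if_neg hdq, if_neg (fun hd => by
          rcases pvDone_append_rev N qs p1 p2 i j s hi hj hd with h | h
          exacts [hown h, hdq h])]

def pvFixCell (w : List (List Int)) (N i j : Nat) : List Int :=
  [pvFix w N i j 0, pvFix w N i j 1, pvFix w N i j 2, pvFix w N i j 3] ++ (pvOrig w N i j).drop 4

def pvTarget (w : List (List Int)) (N : Nat) : List (List Int) :=
  (List.range N).flatMap (fun i => (List.range N).map (fun j => pvFixCell w N i j))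

def pvAll (N : Nat) : List (Nat × Nat) :=
  (List.range N).flatMap (fun i => (List.range N).map (fun j => (i, j)))

theorem pvAll_mem (N : Nat) (p : Nat × Nat) : p ∈ pvAll N ↔ p.1 < N ∧ p.2 < N := by
  obtain ⟨a, b⟩ := p
  simp only [pvAll, List.mem_flatMap, List.mem_map, List.mem_range]
  constructor
  · rintro ⟨x, hx, y, hy, he⟩
    obtain ⟨rfl, rfl⟩ := Prod.mk.injEq .. |>.mp he.symm
    exact ⟨hx, hy⟩
  · rintro ⟨h1, h2⟩
    exact ⟨a, h1, b, h2, rfl⟩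

theorem pvAll_nodup (N : Nat) : (pvAll N).Nodup :=
  List.Nodup.product (List.nodup_range) (List.nodup_range)

theorem pvLtCast (a b : Nat) : ((a:Int) < (b:Int) - 1) = (a < b - 1) := by
  apply propext; omega

theorem pvSetD_three (xs : List Int) (v : Int) : PySem.List.pySetD xs (3:Int) v = xs.set 3 v := by
  simp [pysem]

theorem pvSetD_one (xs : List Int) (v : Int) : PySem.List.pySetD xs (1:Int) v = xs.set 1 v := by
  simp [pysem]

theorem pvSetD_zero (xs : List Int) (v : Int) : PySem.List.pySetD xs (0:Int) v = xs.set 0 v := by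
  simp [pysem]

theorem pvSetD_two (xs : List Int) (v : Int) : PySem.List.pySetD xs (2:Int) v = xs.set 2 v := by
  simp [pysem]

theorem pvCastSucc (j : Nat) : ((j:Int) + 1) = (((j+1:Nat)):Int) := by push_cast; ring

theorem pvBody_cast (N : Nat) (g : List (List (List Int))) (i j : Nat) :
    (let g1 :=
      if (j:Int) < (N:Int) - 1 then
        (if pvGet3 g (i:Int) (j:Int) 1 = 1 then pvSet3 g (i:Int) ((j:Int)+1) 3 1
         else if pvGet3 g (i:Int) ((j:Int)+1) 3 = 1 then pvSet3 g (i:Int) (j:Int) 1 1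
         else g)
      else g
     if (i:Int) < (N:Int) - 1 then
       (if pvGet3 g1 (i:Int) (j:Int) 2 = 1 then pvSet3 g1 ((i:Int)+1) (j:Int) 0 1
        else if pvGet3 g1 ((i:Int)+1) (j:Int) 0 = 1 then pvSet3 g1 (i:Int) (j:Int) 2 1
        else g1)
     else g1) = pvStep N g (i, j) := by
  simp only [pvGet3, pvSet3, pvStep, pvCastSucc, pvLtCast,
    PySem.List.pyGetD_natCast, PySem.List.pyGetD_ofNat', PySem.List.pySetD_natCast,
    pvSetD_three, pvSetD_one, pvSetD_zero, pvSetD_two]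
  rfl

theorem pvPhase2 (N : Nat) (g : List (List (List Int))) :
    (List.range N).foldl (fun (g : List (List (List Int))) (i : Nat) =>
      (List.range N).foldl (fun (g : List (List (List Int))) (j : Nat) =>
        let g1 :=
          if (j:Int) < (N:Int) - 1 then
            (if pvGet3 g (i:Int) (j:Int) 1 = 1 then pvSet3 g (i:Int) ((j:Int)+1) 3 1
             else if pvGet3 g (i:Int) ((j:Int)+1) 3 = 1 then pvSet3 g (i:Int) (j:Int) 1 1
             else g)
          else g
        if (i:Int) < (N:Int) - 1 then
          (if pvGet3 g1 (i:Int) (j:Int) 2 = 1 then pvSet3 g1 ((i:Int)+1) (j:Int) 0 1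
           else if pvGet3 g1 ((i:Int)+1) (j:Int) 0 = 1 then pvSet3 g1 (i:Int) (j:Int) 2 1
           else g1)
        else g1) g) g = (pvAll N).foldl (pvStep N) g := by
  rw [pvAll, List.foldl_flatMap]
  simp only [List.foldl_map]
  refine PySem.List.foldl_congr_mem _ _ _ _ fun g' i hi => ?_
  refine PySem.List.foldl_congr_mem _ _ _ _ fun g'' j hj => ?_
  exact pvBody_cast N g'' i j

theorem pvCellFinal (walls : List (List Int)) (N i j : Nat) (hi : i < N) (hj : j < N)
    (h4 : ∀ k, k < N * N → 4 ≤ (walls.getD k []).length) :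
    pvGetC ((pvAll N).foldl (pvStep N) (pvG0 walls N)) i j = pvFixCell walls N i j := by
  obtain ⟨glen, grow, gcell, gchar⟩ := pv_loop_char walls N h4 (pvAll N)
    (fun p hp => (pvAll_mem N p).mp hp) (pvAll_nodup N)
  have hL := gcell i j hi hj
  have h4' : 4 ≤ (pvOrig walls N i j).length := h4 _ (pvIdx_lt N i j hi hj)
  apply List.ext_getElem
  · rw [hL]
    simp only [pvFixCell, List.length_append, List.length_cons, List.length_nil, List.length_drop]
    omega
  · intro s hs1 hs2
    have hsL : s < (pvOrig walls N i j).length := by rw [hL] at hs1; exact hs1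
    rw [← List.getD_eq_getElem (pvGetC _ i j) 0 hs1]
    rw [show (pvGetC ((pvAll N).foldl (pvStep N) (pvG0 walls N)) i j).getD s 0 =
      pvGetN ((pvAll N).foldl (pvStep N) (pvG0 walls N)) i j s from rfl]
    rw [gchar i j s hi hj]
    match s, hsL with
    | 0, _ =>
      rw [show (pvFixCell walls N i j)[0]'hs2 = pvFix walls N i j 0 from by
        simp [pvFixCell]]
      by_cases h0 : 0 < i
      · rw [if_pos (by simp [pvDoneB, pvAll_mem]; omega)]
      · rw [if_neg (by
          simp only [pvDoneB, Bool.or_eq_true, Bool.and_eq_true, beq_iff_eq,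
            decide_eq_true_eq, and_assoc, or_assoc]
          rintro (⟨h, _⟩ | ⟨h, _⟩ | ⟨h, _⟩ | ⟨_, h, _⟩) <;> omega)]
        simp [pvFix, h0]
    | 1, _ =>
      rw [show (pvFixCell walls N i j)[1]'hs2 = pvFix walls N i j 1 from by
        simp [pvFixCell]]
      by_cases h0 : j < N - 1
      · rw [if_pos (by simp [pvDoneB, pvAll_mem]; omega)]
      · rw [if_neg (by
          simp only [pvDoneB, Bool.or_eq_true, Bool.and_eq_true, beq_iff_eq,
            decide_eq_true_eq, and_assoc, or_assoc]
          rintro (⟨_, h, _⟩ | ⟨h, _⟩ | ⟨h, _⟩ | ⟨h, _⟩) <;> omega)]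
        simp [pvFix, h0]
    | 2, _ =>
      rw [show (pvFixCell walls N i j)[2]'hs2 = pvFix walls N i j 2 from by
        simp [pvFixCell]]
      by_cases h0 : i < N - 1
      · rw [if_pos (by simp [pvDoneB, pvAll_mem]; omega)]
      · rw [if_neg (by
          simp only [pvDoneB, Bool.or_eq_true, Bool.and_eq_true, beq_iff_eq,
            decide_eq_true_eq, and_assoc, or_assoc]
          rintro (⟨h, _⟩ | ⟨h, _⟩ | ⟨_, h, _⟩ | ⟨h, _⟩) <;> omega)]
        simp [pvFix, h0]
    | 3, _ =>
      rw [show (pvFixCell walls N i j)[3]'hs2 = pvFix walls N i j 3 from by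
        simp [pvFixCell]]
      by_cases h0 : 0 < j
      · rw [if_pos (by simp [pvDoneB, pvAll_mem]; omega)]
      · rw [if_neg (by
          simp only [pvDoneB, Bool.or_eq_true, Bool.and_eq_true, beq_iff_eq,
            decide_eq_true_eq, and_assoc, or_assoc]
          rintro (⟨h, _⟩ | ⟨_, h, _⟩ | ⟨h, _⟩ | ⟨h, _⟩) <;> omega)]
        simp [pvFix, h0]
    | (m+4), hm =>
      rw [if_neg (by
        simp only [pvDoneB, Bool.or_eq_true, Bool.and_eq_true, beq_iff_eq,
          decide_eq_true_eq, and_assoc, or_assoc]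
        rintro (⟨h, _⟩ | ⟨h, _⟩ | ⟨h, _⟩ | ⟨h, _⟩) <;> omega)]
      rw [show (pvFixCell walls N i j)[m+4]'hs2 = (pvOrig walls N i j)[m+4]'hm from by
        simp only [pvFixCell]
        rw [List.getElem_append_right (by simp)]
        simp only [List.length_cons, List.length_nil, List.getElem_drop]
        congr 1
        omega]
      exact List.getD_eq_getElem _ 0 hm

theorem pvA_eq (walls : List (List Int)) (n : Int) (hn : 0 ≤ n)
    (hlenI : n * n ≤ (walls.length : Int))
    (h4I : ∀ l ∈ walls.take (n * n).toNat, 4 ≤ l.length) :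
    ensure_wall_consistency_py walls n = pvTarget walls n.toNat := by
  obtain ⟨N, rfl⟩ : ∃ N : Nat, n = (N : Int) := ⟨n.toNat, by omega⟩
  rw [Int.toNat_natCast]
  have hlen : N * N ≤ walls.length := by exact_mod_cast hlenI
  have h4 : ∀ k, k < N * N → 4 ≤ (walls.getD k []).length := by
    intro k hk
    have hkl : k < walls.length := lt_of_lt_of_le hk hlen
    have htn : ((N:Int) * N).toNat = N * N := by
      rw [show ((N:Int) * N) = ((N*N : Nat) : Int) by push_cast; ring, Int.toNat_natCast]
    have hkt : k < (walls.take (N*N)).length := by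
      rw [List.length_take]; omega
    have hmem : walls.getD k [] ∈ walls.take ((N:Int) * N).toNat := by
      rw [htn, List.getD_eq_getElem _ _ hkl]
      have he : (walls.take (N*N))[k]'hkt = walls[k]'hkl := List.getElem_take
      rw [← he]
      exact List.getElem_mem hkt
    exact h4I _ hmem
  unfold ensure_wall_consistency_py
  simp only [PySem.List.pyRange_zero_natCast, List.foldl_map,
    PySem.List.foldl_append_singleton_eq_map, List.nil_append,
    PySem.List.foldl_append_eq_flatMap]
  rw [show (List.map (fun (i : Nat) => List.map
      (fun (j : Nat) => PySem.List.pyGetD walls ((i:Int) * (N:Int) + (j:Int)) []) (List.range N))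
      (List.range N)) = pvG0 walls N from by
    unfold pvG0
    refine List.map_congr_left fun i _ => List.map_congr_left fun j _ => ?_
    rw [show ((i:Int) * (N:Int) + (j:Int)) = ((i*N+j : Nat):Int) by push_cast; ring,
      PySem.List.pyGetD_natCast]
    rfl]
  rw [pvPhase2]
  rw [pvTarget]
  refine List.flatMap_congr fun i hi => ?_
  refine List.map_congr_left fun j hj => ?_
  rw [List.mem_range] at hi hj
  rw [PySem.List.pyGetD_natCast, PySem.List.pyGetD_natCast]
  exact pvCellFinal walls N i j hi hj h4

theorem pvCell_eq (walls : List (List Int)) (N i j : Nat) (hi : i < N) (hj : j < N) :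
    pvCell walls (N : Int) (i : Int) (j : Int) = pvFixCell walls N i j := by
  have hidx : ((i : Int) * N + j) = ((i * N + j : Nat) : Int) := by push_cast; ring
  have hr : ((i : Int) + 1) * N + j = (((i+1) * N + j : Nat) : Int) := by push_cast; ring
  have hd' : ((i * N + j : Nat) : Int) + 1 = ((i * N + (j+1) : Nat) : Int) := by push_cast; ring
  have c1 : (0 < (i:Int)) ↔ 0 < i := by omega
  have c2 : ((j:Int) < (N:Int) - 1) ↔ j < N - 1 := by omega
  have c3 : ((i:Int) < (N:Int) - 1) ↔ i < N - 1 := by omega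
  have c4 : (0 < (j:Int)) ↔ 0 < j := by omega
  have htail : PySem.List.slice (walls.getD (i * N + j) []) (some 4) none
      = (walls.getD (i * N + j) []).drop 4 := by
    rw [PySem.List.slice_from _ (by norm_num)]; congr 1
  by_cases hi0 : 0 < i <;> by_cases hj0 : 0 < j
  · have hl : ((i:Int) - 1) * N + j = (((i - 1) * N + j : Nat) : Int) := by
      have h' : ((i - 1 : Nat) : Int) = (i:Int) - 1 := by omega
      push_cast [h']; ring
    have hu' : ((i * N + j : Nat) : Int) - 1 = ((i * N + (j - 1) : Nat) : Int) := by
      have h' : ((j - 1 : Nat) : Int) = (j:Int) - 1 := by omega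
      push_cast [h']; ring
    simp only [pvCell, pvFixCell, pvFix, pvRd, pvOrig, hidx, hr, hd', hl, hu',
      PySem.List.pyGetD_natCast, PySem.List.pyGetD_zero, PySem.List.pyGetD_ofNat', c1, c2, c3, c4, htail]
    all_goals simp [hi0, hj0]
  · have hl : ((i:Int) - 1) * N + j = (((i - 1) * N + j : Nat) : Int) := by
      have h' : ((i - 1 : Nat) : Int) = (i:Int) - 1 := by omega
      push_cast [h']; ring
    simp only [pvCell, pvFixCell, pvFix, pvRd, pvOrig, hidx, hr, hd', hl,
      PySem.List.pyGetD_natCast, PySem.List.pyGetD_zero, PySem.List.pyGetD_ofNat', c1, c2, c3, c4, htail]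
    all_goals simp [hi0, hj0]
  · have hu' : ((i * N + j : Nat) : Int) - 1 = ((i * N + (j - 1) : Nat) : Int) := by
      have h' : ((j - 1 : Nat) : Int) = (j:Int) - 1 := by omega
      push_cast [h']; ring
    simp only [pvCell, pvFixCell, pvFix, pvRd, pvOrig, hidx, hr, hd', hu',
      PySem.List.pyGetD_natCast, PySem.List.pyGetD_zero, PySem.List.pyGetD_ofNat', c1, c2, c3, c4, htail]
    all_goals simp [hi0, hj0]
  · simp only [pvCell, pvFixCell, pvFix, pvRd, pvOrig, hidx, hr, hd',
      PySem.List.pyGetD_natCast, PySem.List.pyGetD_zero, PySem.List.pyGetD_ofNat', c1, c2, c3, c4, htail]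
    all_goals simp [hi0, hj0]

theorem pvB_eq (walls : List (List Int)) (n : Int) (hn : 0 ≤ n) :
    ensure_wall_consistency_py_alt walls n = pvTarget walls n.toNat := by
  obtain ⟨N, rfl⟩ : ∃ N : Nat, n = (N : Int) := ⟨n.toNat, by omega⟩
  rw [ensure_wall_consistency_py_alt, pvTarget, PySem.List.pyRange_zero_natCast, Int.toNat_natCast]
  rw [List.flatMap_map]
  refine List.flatMap_congr (fun i hi => ?_)
  rw [List.map_map]
  refine List.map_congr_left (fun j hj => ?_)
  exact pvCell_eq walls N i j (List.mem_range.mp hi) (List.mem_range.mp hj)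

theorem pv_neg (walls : List (List Int)) (n : Int) (hn : n ≤ 0) :
    ensure_wall_consistency_py walls n = [] ∧ ensure_wall_consistency_py_alt walls n = [] := by
  have hr : PySem.List.pyRange 0 n 1 = [] := PySem.List.pyRange_one_eq_nil hn
  constructor <;> simp [ensure_wall_consistency_py, ensure_wall_consistency_py_alt, hr]

-- ===== VERDICT (by name: the statement is the Claim_ definition above) =====
theorem ensure_wall_consistency_py_spec : Claim_equal_ensure_wall_consistency_py := by
  intro walls n _ hpre
  unfold Spec_ensure_wall_consistency_py
  by_cases hn : n ≤ 0
  · rw [(pv_neg walls n hn).1, (pv_neg walls n hn).2]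
  · rcases hpre with h | ⟨hlen, h4⟩
    · omega
    · rw [pvA_eq walls n (by omega) hlen h4, pvB_eq walls n (by omega)]
      -- both equal pvTarget walls n.toNat
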